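-- pv_equiv track=rewrite | github.com/NikolayBatov/FistPython | Lesson5/dz6.py | sum_h
-- ===== SOURCE A (Python) =====
-- def sum_h(l_hours):
--     if len(l_hours) >= 1:
--         try:
--             value = l_hours.pop()
--             return int(value[:value.find('(')]) + sum_h(l_hours)
--         except ValueError:
--             return sum_h(l_hours)
--     else:
--         return 0
-- ===== SOURCE B (Python) =====
-- def sum_h(l_hours):
--     total = 0
--     for value in l_hours:
--         try:
--             total += int(value[:value.find('(')])
--         except ValueError:
--             pass
--     l_hours.clear()
--     return total
-- ===== Notes on version B (the rewrite author's own statement) =====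
-- stated objective: simpler
-- what changed: Replaces the tail-popping recursion with a single forward loop accumulating the parsed prefixes (emptying the list once at the end), relying on commutativity of addition.
import Mathlib
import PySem

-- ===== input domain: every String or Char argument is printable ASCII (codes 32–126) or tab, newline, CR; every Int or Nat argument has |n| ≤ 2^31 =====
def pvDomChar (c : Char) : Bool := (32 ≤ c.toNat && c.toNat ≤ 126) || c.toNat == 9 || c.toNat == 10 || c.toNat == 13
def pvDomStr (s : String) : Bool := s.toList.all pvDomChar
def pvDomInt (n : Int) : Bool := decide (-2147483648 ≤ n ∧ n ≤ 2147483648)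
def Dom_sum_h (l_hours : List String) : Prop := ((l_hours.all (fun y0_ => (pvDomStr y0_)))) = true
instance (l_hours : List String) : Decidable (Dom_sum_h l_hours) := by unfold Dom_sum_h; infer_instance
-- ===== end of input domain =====

-- B replaces A's tail-popping recursion by one forward accumulating loop (objective: simpler).
-- Both Pythons empty the input list in place; the equivalence proved here is about the return value.

-- ===== PORT A =====
-- A: pop the last element, parse int(value[:value.find('(')]) (ValueError → skip), recurse on the rest.
set_option maxHeartbeats 1000000 in
def sum_h (l_hours : List String) : Int :=
  if _h : 1 ≤ l_hours.length then
    let value := l_hours.getLastD ""          -- l_hours.pop()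
    let rest := l_hours.dropLast
    match PySem.Int.ofStr? (PySem.Str.slice value none (some (PySem.Str.find value "("))) with
    | some n => n + sum_h rest                -- int succeeded
    | none => sum_h rest                      -- except ValueError
  else 0
termination_by l_hours.length
decreasing_by
  simp only [List.length_dropLast]; omega

-- ===== PORT B =====
-- B: forward fold over the list, adding each parsable prefix to the accumulator.
def sum_h_alt (l_hours : List String) : Int :=
  l_hours.foldl (fun total value =>
    match PySem.Int.ofStr? (PySem.Str.slice value none (some (PySem.Str.find value "("))) with
    | some n => total + n
    | none => total) 0

-- ===== PRECONDITION & SPEC =====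
def Spec_sum_h (l_hours : List String) (out : Int) : Prop := out = sum_h_alt l_hours
instance (l_hours : List String) (out : Int) : Decidable (Spec_sum_h l_hours out) := by unfold Spec_sum_h; infer_instance

-- ===== CLAIM (what is proved, stated in full; the proofs are below) =====
def Claim_equal_sum_h : Prop := ∀ (l_hours : List String), Dom_sum_h l_hours → Spec_sum_h l_hours (sum_h l_hours)

-- ===== LEMMAS AND PROOFS =====

-- the value A adds per element (0 if int() would raise ValueError)
def pvParse (value : String) : Int :=
  match PySem.Int.ofStr? (PySem.Str.slice value none (some (PySem.Str.find value "("))) with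
  | some n => n
  | none => 0

theorem sum_h_append_singleton (xs : List String) (x : String) :
    sum_h (xs ++ [x]) = pvParse x + sum_h xs := by
  rw [sum_h]
  simp [pvParse]
  split <;> simp

theorem sum_h_eq_sum (l : List String) : sum_h l = (l.map pvParse).sum := by
  induction l using List.reverseRecOn with
  | nil => simp [sum_h]
  | append_singleton xs x ih =>
      rw [sum_h_append_singleton, ih]
      simp; omega

theorem sum_h_alt_foldl (l : List String) (t : Int) :
    l.foldl (fun total value =>
      match PySem.Int.ofStr? (PySem.Str.slice value none (some (PySem.Str.find value "("))) with
      | some n => total + n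
      | none => total) t = t + (l.map pvParse).sum := by
  induction l generalizing t with
  | nil => simp
  | cons x xs ih =>
      simp only [List.foldl_cons, List.map_cons, List.sum_cons, ih, pvParse]
      cases hp : PySem.Int.ofStr? (PySem.Str.slice x none (some (PySem.Str.find x "("))) with
      | none => simp
      | some n => simp; ring

-- ===== VERDICT (by name: the statement is the Claim_ definition above) =====
theorem sum_h_spec : Claim_equal_sum_h := by
  intro l _
  unfold Spec_sum_h sum_h_alt
  rw [sum_h_alt_foldl, sum_h_eq_sum]
  omega
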